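-- pv_equiv track=rewrite | github.com/konfou/grail-py3 | grail/printing/utils.py | find_word_breaks
-- ===== SOURCE A (Python) =====
-- def find_word_breaks(data):
--     datalen = nextbrk = len(data)
--     prevbreaks = [-1] * datalen
--     nextbreaks = [datalen] * datalen
--     indexes = range(datalen)
--     #
--     prevbrk = -1
--     for i in indexes:
--         prevbreaks[i] = prevbrk
--         if data[i] == ' ':
--             prevbrk = i
--     #
--     for i in reversed(indexes):
--         nextbreaks[i] = nextbrk
--         if data[i] == ' ':
--             nextbrk = i
--     #
--     return prevbreaks, nextbreaks
-- ===== SOURCE B (Python) =====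
-- def find_word_breaks(data):
--     n = len(data)
--     spaces = [i for i, c in enumerate(data) if c == ' ']
--     bounds = [-1] + spaces + [n]
--     prevbreaks = []
--     nextbreaks = []
--     for a, b in zip(bounds, bounds[1:]):
--         prevbreaks += [a] * (min(b, n - 1) - a)
--         nextbreaks += [b] * (b - max(a, 0))
--     return prevbreaks, nextbreaks
-- ===== Notes on version B (the rewrite author's own statement) =====
-- stated objective: alternative
-- what changed: Replaces A's two per-index running-pointer scans (forward for prevbreaks, reversed for nextbreaks) with a single pass over the list of space positions that fills whole constant segments between consecutive spaces at once.
import Mathlib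
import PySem

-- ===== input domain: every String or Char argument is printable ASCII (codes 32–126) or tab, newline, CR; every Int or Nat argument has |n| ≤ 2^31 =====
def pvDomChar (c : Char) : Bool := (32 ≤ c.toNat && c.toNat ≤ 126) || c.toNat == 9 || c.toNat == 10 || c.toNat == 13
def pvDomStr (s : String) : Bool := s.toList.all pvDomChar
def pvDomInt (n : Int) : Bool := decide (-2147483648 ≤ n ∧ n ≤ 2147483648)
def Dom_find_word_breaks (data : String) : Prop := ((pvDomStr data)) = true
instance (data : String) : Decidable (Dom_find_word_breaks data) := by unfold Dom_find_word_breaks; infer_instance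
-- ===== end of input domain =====

-- B replaces A's two per-index running-pointer scans by one segment fill driven by the
-- list of space positions (objective: alternative decomposition, same O(n) cost).

-- ===== PORT A =====
-- forward loop: prevbreaks[i] = prevbrk, then update prevbrk at spaces
def pvPrevA (p : Int) (i : Int) : List Char → List Int
  | [] => []
  | c :: t => p :: pvPrevA (if c = ' ' then i else p) (i + 1) t

-- reversed loop, as right-to-left recursion: returns (nextbreaks of the suffix, nextbrk
-- value after processing the suffix)
def pvNextA (E : Int) (i : Int) : List Char → List Int × Int
  | [] => ([], E)
  | c :: t =>
      let r := pvNextA E (i + 1) t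
      (r.2 :: r.1, if c = ' ' then i else r.2)

def find_word_breaks (data : String) : List Int × List Int :=
  let cs := data.toList
  let n : Int := cs.length
  (pvPrevA (-1) 0 cs, (pvNextA n 0 cs).1)

-- ===== PORT B =====
def find_word_breaks_alt (data : String) : List Int × List Int :=
  let cs := data.toList
  let n : Int := cs.length
  let spaces : List Int :=
    (PySem.List.enumerate cs 0).foldl (fun acc ic => if ic.2 = ' ' then acc ++ [ic.1] else acc) []
  let bounds : List Int := -1 :: (spaces ++ [n])
  let pairs := bounds.zip (bounds.drop 1)
  pairs.foldl
    (fun acc ab =>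
      (acc.1 ++ List.replicate (min ab.2 (n - 1) - ab.1).toNat ab.1,
       acc.2 ++ List.replicate (ab.2 - max ab.1 0).toNat ab.2))
    ([], [])

-- ===== PRECONDITION & SPEC =====
def Spec_find_word_breaks (data : String) (out : List Int × List Int) : Prop := out = find_word_breaks_alt data
instance (data : String) (out : List Int × List Int) : Decidable (Spec_find_word_breaks data out) := by unfold Spec_find_word_breaks; infer_instance

-- ===== CLAIM (what is proved, stated in full; the proofs are below) =====
def Claim_equal_find_word_breaks : Prop := ∀ (data : String), Dom_find_word_breaks data → Spec_find_word_breaks data (find_word_breaks data)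

-- ===== LEMMAS AND PROOFS =====

-- proof-side spec: the positions of spaces in cs, counted from i
def pvSpacesFrom (i : Int) : List Char → List Int
  | [] => []
  | c :: t => if c = ' ' then i :: pvSpacesFrom (i + 1) t else pvSpacesFrom (i + 1) t

-- segment-fill form of prevbreaks: positions i.. with last space p, spaces sp, end E
def pvFillPrev (E : Int) : Int → Int → List Int → List Int
  | i, p, [] => List.replicate (E - i).toNat p
  | i, p, s :: rest => List.replicate (s - i + 1).toNat p ++ pvFillPrev E (s + 1) s rest

-- segment-fill form of nextbreaks
def pvFillNext (E : Int) : Int → List Int → List Int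
  | i, [] => List.replicate (E - i).toNat E
  | i, s :: rest => List.replicate (s - i).toNat s ++ pvFillNext E s rest

theorem pvSpacesFrom_mem {i s : Int} {cs : List Char} (h : s ∈ pvSpacesFrom i cs) :
    i ≤ s ∧ s < i + cs.length := by
  induction cs generalizing i with
  | nil => simp [pvSpacesFrom] at h
  | cons c t ih =>
      simp only [pvSpacesFrom] at h
      split at h
      · rcases List.mem_cons.1 h with h | h
        · subst h; simp only [List.length_cons]; push_cast; omega
        · have := ih h; simp at *; omega
      · have := ih h; simp at *; omega

theorem pvFillPrev_step {E i p : Int} {sp : List Int}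
    (hE : sp = [] → i < E) (hmem : ∀ s ∈ sp, i ≤ s) :
    pvFillPrev E i p sp = p :: pvFillPrev E (i + 1) p sp := by
  cases sp with
  | nil =>
      have h : (E - i).toNat = (E - (i + 1)).toNat + 1 := by have := hE rfl; omega
      simp [pvFillPrev, h, List.replicate_succ]
  | cons s rest =>
      have hs : i ≤ s := hmem s (by simp)
      have h : (s - i + 1).toNat = (s - (i + 1) + 1).toNat + 1 := by omega
      simp [pvFillPrev, h, List.replicate_succ]

theorem pvFillNext_step {E i : Int} {sp : List Int}
    (hE : sp = [] → i < E) (hmem : ∀ s ∈ sp, i < s) :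
    pvFillNext E i sp = sp.headD E :: pvFillNext E (i + 1) sp := by
  cases sp with
  | nil =>
      have h : (E - i).toNat = (E - (i + 1)).toNat + 1 := by have := hE rfl; omega
      simp [pvFillNext, h, List.replicate_succ]
  | cons s rest =>
      have hs : i < s := hmem s (by simp)
      have h : (s - i).toNat = (s - (i + 1)).toNat + 1 := by omega
      simp [pvFillNext, h, List.replicate_succ]

-- A's forward scan produces the segment fill
theorem pvPrevA_eq_fill (cs : List Char) :
    ∀ (i p : Int), pvPrevA p i cs = pvFillPrev (i + cs.length) i p (pvSpacesFrom i cs) := by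
  induction cs with
  | nil =>
      intro i p
      simp [pvPrevA, pvSpacesFrom, pvFillPrev]
  | cons c t ih =>
      intro i p
      have hlen : i + (((c :: t).length : Nat) : Int) = (i + 1) + (t.length : Int) := by
        simp only [List.length_cons]; push_cast; ring
      by_cases hc : c = ' '
      · have hA : pvPrevA p i (c :: t) = p :: pvPrevA i (i + 1) t := by simp [pvPrevA, hc]
        have hsp : pvSpacesFrom i (c :: t) = i :: pvSpacesFrom (i + 1) t := by
          simp [pvSpacesFrom, hc]
        have h1 : (i - i + 1).toNat = 1 := by omega
        rw [hA, hsp, hlen, ih (i + 1) i]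
        simp [pvFillPrev]
      · have hA : pvPrevA p i (c :: t) = p :: pvPrevA p (i + 1) t := by simp [pvPrevA, hc]
        have hsp : pvSpacesFrom i (c :: t) = pvSpacesFrom (i + 1) t := by
          simp [pvSpacesFrom, hc]
        rw [hA, hsp, hlen, ih (i + 1) p]
        conv_rhs => rw [pvFillPrev_step (E := (i + 1) + (t.length : Int))
              (by intro _; omega)
              (by intro s hs; have := pvSpacesFrom_mem hs; omega)]

-- A's reversed scan produces the segment fill; the second component is the running nextbrk
theorem pvNextA_eq_fill (cs : List Char) :
    ∀ (i E : Int), E = i + cs.length →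
      pvNextA E i cs = (pvFillNext E i (pvSpacesFrom i cs), (pvSpacesFrom i cs).headD E) := by
  induction cs with
  | nil =>
      intro i E hE
      simp at hE
      subst hE
      simp [pvNextA, pvSpacesFrom, pvFillNext]
  | cons c t ih =>
      intro i E hE
      have hE' : E = (i + 1) + (t.length : Int) := by simp only [List.length_cons] at hE; push_cast at hE; omega
      have hrec := ih (i + 1) E hE'
      have hstep : pvFillNext E i (pvSpacesFrom (i + 1) t)
          = (pvSpacesFrom (i + 1) t).headD E :: pvFillNext E (i + 1) (pvSpacesFrom (i + 1) t) := by
        apply pvFillNext_step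
        · intro _; omega
        · intro s hs; have := pvSpacesFrom_mem hs; omega
      by_cases hc : c = ' '
      · have hA : pvNextA E i (c :: t)
            = ((pvNextA E (i + 1) t).2 :: (pvNextA E (i + 1) t).1, i) := by
          simp [pvNextA, hc]
        have hsp : pvSpacesFrom i (c :: t) = i :: pvSpacesFrom (i + 1) t := by
          simp [pvSpacesFrom, hc]
        have h0 : (i - i).toNat = 0 := by omega
        rw [hA, hsp, hrec]
        simp [pvFillNext, hstep]
      · have hA : pvNextA E i (c :: t)
            = ((pvNextA E (i + 1) t).2 :: (pvNextA E (i + 1) t).1, (pvNextA E (i + 1) t).2) := by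
          simp [pvNextA, hc]
        have hsp : pvSpacesFrom i (c :: t) = pvSpacesFrom (i + 1) t := by
          simp [pvSpacesFrom, hc]
        rw [hA, hsp, hrec]
        simp [hstep]

-- B's space comprehension computes pvSpacesFrom
theorem pvSpaces_enum (cs : List Char) :
    ∀ (s : Int) (acc : List Int),
      (PySem.List.enumerate cs s).foldl (fun acc ic => if ic.2 = ' ' then acc ++ [ic.1] else acc) acc
        = acc ++ pvSpacesFrom s cs := by
  induction cs with
  | nil => intro s acc; simp [PySem.List.enumerate, pvSpacesFrom]
  | cons c t ih =>
      intro s acc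
      rw [PySem.List.enumerate_cons]
      by_cases hc : c = ' ' <;> simp [List.foldl_cons, hc, ih, pvSpacesFrom]

-- sortedness of the space positions
theorem pvSpacesFrom_sorted (cs : List Char) :
    ∀ i : Int, (pvSpacesFrom i cs).Pairwise (· < ·) := by
  induction cs with
  | nil => intro i; simp [pvSpacesFrom]
  | cons c t ih =>
      intro i
      by_cases hc : c = ' '
      · simp only [pvSpacesFrom, hc, ite_true]
        exact List.Pairwise.cons (fun s hs => by have := pvSpacesFrom_mem hs; omega) (ih (i + 1))
      · simp only [pvSpacesFrom, hc, ite_false]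
        exact ih (i + 1)

-- bridge: B's prev segments (a flatMap over consecutive bound pairs) = pvFillPrev
theorem pvBridgePrev (N : Int) (sp : List Int) :
    ∀ a : Int, (∀ s ∈ sp, a < s ∧ s ≤ N - 1) → sp.Pairwise (· < ·) →
      ((a :: (sp ++ [N])).zip (sp ++ [N])).flatMap
          (fun ab => List.replicate (min ab.2 (N - 1) - ab.1).toNat ab.1)
        = pvFillPrev N (a + 1) a sp := by
  induction sp with
  | nil =>
      intro a _ _
      have hmin : min N (N - 1) = N - 1 := by omega
      have h : N - 1 - a = N - (a + 1) := by omega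
      simp [List.zip, pvFillPrev, h]
  | cons s rest ih =>
      intro a hmem hsort
      have hs := hmem s (by simp)
      have hmin : min s (N - 1) = s := by omega
      have hcnt : s - a = s - (a + 1) + 1 := by omega
      simp only [List.cons_append, List.zip_cons_cons, List.flatMap_cons]
      rw [ih s (fun x hx => ⟨(List.pairwise_cons.1 hsort).1 x hx, (hmem x (by simp [hx])).2⟩)
            (List.pairwise_cons.1 hsort).2]
      rw [show pvFillPrev N (a + 1) a (s :: rest)
            = List.replicate (s - (a + 1) + 1).toNat a ++ pvFillPrev N (s + 1) s rest from rfl]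
      rw [hmin, hcnt]

-- bridge: B's next segments = pvFillNext
theorem pvBridgeNext (N : Int) (sp : List Int) :
    ∀ a : Int, (∀ s ∈ sp, a < s ∧ 0 ≤ s) → sp.Pairwise (· < ·) →
      ((a :: (sp ++ [N])).zip (sp ++ [N])).flatMap
          (fun ab => List.replicate (ab.2 - max ab.1 0).toNat ab.2)
        = pvFillNext N (max a 0) sp := by
  induction sp with
  | nil => intro a _ _; simp [List.zip, pvFillNext]
  | cons s rest ih =>
      intro a hmem hsort
      have hs := hmem s (by simp)
      have hmaxs : max s 0 = s := by omega
      simp only [List.cons_append, List.zip_cons_cons, List.flatMap_cons]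
      rw [ih s (fun x hx => ⟨(List.pairwise_cons.1 hsort).1 x hx, (hmem x (by simp [hx])).2⟩)
            (List.pairwise_cons.1 hsort).2]
      rw [show pvFillNext N (max a 0) (s :: rest)
            = List.replicate (s - max a 0).toNat s ++ pvFillNext N s rest from rfl]
      rw [hmaxs]

-- ===== VERDICT (by name: the statement is the Claim_ definition above) =====
theorem find_word_breaks_spec : Claim_equal_find_word_breaks := by
  intro data _
  unfold Spec_find_word_breaks find_word_breaks find_word_breaks_alt
  dsimp only
  rw [PySem.List.foldl_prod_mk
        (fun (x : List Int) (ab : Int × Int) =>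
          x ++ List.replicate (min ab.2 (((data.toList.length : Nat) : Int) - 1) - ab.1).toNat ab.1)
        (fun (x : List Int) (ab : Int × Int) =>
          x ++ List.replicate (ab.2 - max ab.1 0).toNat ab.2),
      pvSpaces_enum data.toList 0 []]
  rw [List.nil_append]
  rw [show List.drop 1 ((-1 : Int) :: (pvSpacesFrom 0 data.toList ++ [((data.toList.length : Nat) : Int)]))
        = pvSpacesFrom 0 data.toList ++ [((data.toList.length : Nat) : Int)] from rfl]
  rw [PySem.List.foldl_append_eq_flatMap, PySem.List.foldl_append_eq_flatMap, List.nil_append,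
      List.nil_append]
  have hmemP : ∀ s ∈ pvSpacesFrom 0 data.toList,
      (-1 : Int) < s ∧ s ≤ ((data.toList.length : Nat) : Int) - 1 := by
    intro s hs; have := pvSpacesFrom_mem (i := 0) hs; omega
  have hmemN : ∀ s ∈ pvSpacesFrom 0 data.toList, (-1 : Int) < s ∧ 0 ≤ s := by
    intro s hs; have := pvSpacesFrom_mem (i := 0) hs; omega
  have hsort := pvSpacesFrom_sorted data.toList 0
  rw [pvBridgePrev _ _ (-1) hmemP hsort, pvBridgeNext _ _ (-1) hmemN hsort]
  rw [pvPrevA_eq_fill data.toList 0 (-1), pvNextA_eq_fill data.toList 0 _ (by omega)]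
  norm_num
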